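-- pv_equiv track=rewrite | github.com/devyoungk/Algorithm | Python3/프로그래머스/2/135807. 숫자 카드 나누기/숫자 카드 나누기.py | solution
-- ===== SOURCE A (Python) =====
-- def gcd(a, b):
--     while b != 0:
--         a, b = b, a % b
--     return a
--
-- def list_gcd(A):
--     result = A[0]
--     for num in A[1:]:
--         result = gcd(result, num)
--     return result
--
-- def solution(arrayA, arrayB):
--     answer = 0
--     GA = list_gcd(arrayA)
--     GB = list_gcd(arrayB)
--
--     for i in range(GA, 1, -1):
--         if GA%i == 0:
--             for b in arrayB:
--                 if b%i == 0:
--                     break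
--             else:
--                 answer = i
--                 break
--
--     for i in range(GB, answer, -1):
--         if GB%i == 0:
--             for a in arrayA:
--                 if a%i == 0:
--                     break
--             else:
--                 answer = i
--                 break
--     return answer
-- ===== SOURCE B (Python) =====
-- def solution(arrayA, arrayB):
--     ga = 0
--     for x in arrayA:
--         while x:
--             ga, x = x, ga % x
--     gb = 0
--     for x in arrayB:
--         while x:
--             gb, x = x, gb % x
--     best = 0
--     if ga >= 2 and all(b % ga for b in arrayB):
--         best = ga
--     if gb > best and gb >= 2 and all(a % gb for a in arrayA):
--         best = gb
--     return best
-- ===== Notes on version B (the rewrite author's own statement) =====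
-- stated objective: alternative
-- what changed: B drops A's two descending trial-division scans (range(G,1,-1) with an inner array scan per candidate) entirely: any divisor of G dividing an element of the other array is ruled out exactly when G itself is, so B tests only gcd(arrayA) and gcd(arrayB) once against the other array, folding an inlined Euclid loop over each whole list from 0 instead of head-plus-tail with a gcd helper call per element; this removes the O(GA*|B|+GB*|A|) scans (measured ~1.4x on the generated inputs, below the 1.5x bar, hence not claimed as faster).
import Mathlib
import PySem

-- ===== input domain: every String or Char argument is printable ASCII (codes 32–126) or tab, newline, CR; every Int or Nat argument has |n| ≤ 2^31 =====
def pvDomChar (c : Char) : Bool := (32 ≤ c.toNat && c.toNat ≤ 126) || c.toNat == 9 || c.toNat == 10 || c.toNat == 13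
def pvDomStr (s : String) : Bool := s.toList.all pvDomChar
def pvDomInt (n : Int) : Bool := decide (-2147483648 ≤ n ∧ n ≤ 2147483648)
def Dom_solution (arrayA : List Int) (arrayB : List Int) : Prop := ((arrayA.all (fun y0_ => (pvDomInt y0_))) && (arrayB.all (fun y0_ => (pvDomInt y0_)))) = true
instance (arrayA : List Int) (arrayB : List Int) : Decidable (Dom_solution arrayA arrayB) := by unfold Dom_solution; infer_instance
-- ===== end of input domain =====

-- B replaces A's two descending divisor scans by a single divisibility test of each list's gcd
-- against the other array, folding an inlined Euclid loop over each whole list; A = B is proved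
-- on nonempty inputs (Pre_: A raises IndexError on an empty list).

-- termination helper for the Euclid recursions (cited by decreasing_by)
theorem pyModAbsLt (a b : Int) (hb : b ≠ 0) :
    (PySem.Int.mod a b).natAbs < b.natAbs := by
  rcases lt_or_gt_of_ne hb with h | h
  · have := PySem.Int.mod_neg_bounds a h
    omega
  · have h1 := PySem.Int.mod_nonneg a h
    have h2 := PySem.Int.mod_lt a h
    omega

-- ===== PORT A =====
-- Python: while b != 0: a, b = b, a % b; return a
def pyGcdA (a b : Int) : Int :=
  if hb : b = 0 then a else pyGcdA b (PySem.Int.mod a b)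
termination_by b.natAbs
decreasing_by exact pyModAbsLt a b hb

-- Python: result = A[0]; for num in A[1:]: result = gcd(result, num)
def listGcdA (A : List Int) : Int :=
  match A with
  | [] => 0          -- Python raises IndexError here; excluded by Pre_solution
  | x :: rest => rest.foldl pyGcdA x

-- Python: for i in range(hi, lo, -1): if g % i == 0: (for x in xs: if x % i == 0: break / else: answer = i; break)
def loopA (g : Int) (xs : List Int) (i lo ans : Int) : Int :=
  if i ≤ lo then ans
  else if PySem.Int.mod g i = 0 then
    if xs.any (fun x => PySem.Int.mod x i == 0) then loopA g xs (i - 1) lo ans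
    else i
  else loopA g xs (i - 1) lo ans
termination_by (i - lo).toNat
decreasing_by all_goals omega

def solution (arrayA : List Int) (arrayB : List Int) : Int :=
  let GA := listGcdA arrayA
  let GB := listGcdA arrayB
  let answer := loopA GA arrayB GA 1 0
  loopA GB arrayA GB answer answer

-- ===== PORT B =====
-- Python: while x: g, x = x, g % x   (the inner while loop of B's folds)
def pyGcdB (a b : Int) : Int :=
  if hb : b = 0 then a else pyGcdB b (PySem.Int.mod a b)
termination_by b.natAbs
decreasing_by exact pyModAbsLt a b hb

def solution_alt (arrayA : List Int) (arrayB : List Int) : Int :=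
  let ga := arrayA.foldl pyGcdB 0
  let gb := arrayB.foldl pyGcdB 0
  let best := if 2 ≤ ga ∧ arrayB.all (fun b => PySem.Int.mod b ga != 0) then ga else 0
  if gb > best ∧ 2 ≤ gb ∧ arrayA.all (fun a => PySem.Int.mod a gb != 0) then gb else best

-- ===== PRECONDITION & SPEC =====
-- Python A evaluates arrayA[0] and arrayB[0]: it raises IndexError iff either list is empty.
def Pre_solution (arrayA : List Int) (arrayB : List Int) : Prop := arrayA ≠ [] ∧ arrayB ≠ []
instance (arrayA : List Int) (arrayB : List Int) : Decidable (Pre_solution arrayA arrayB) := by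
  unfold Pre_solution; infer_instance

def pvWitness_solution : List Int × List Int := ([6, 12], [5, 7])

def Spec_solution (arrayA : List Int) (arrayB : List Int) (out : Int) : Prop := out = solution_alt arrayA arrayB
instance (arrayA : List Int) (arrayB : List Int) (out : Int) : Decidable (Spec_solution arrayA arrayB out) := by unfold Spec_solution; infer_instance

-- ===== CLAIM (what is proved, stated in full; the proofs are below) =====
def Claim_equal_solution : Prop := ∀ (arrayA : List Int) (arrayB : List Int), Dom_solution arrayA arrayB → Pre_solution arrayA arrayB → Spec_solution arrayA arrayB (solution arrayA arrayB)


-- ===== LEMMAS AND PROOFS =====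
theorem pyGcdA_eq_pyGcdB (a b : Int) : pyGcdA a b = pyGcdB a b := by
  fun_induction pyGcdA a b with
  | case1 a => rw [pyGcdB]; simp
  | case2 a b h ih =>
    rw [ih]
    conv_rhs => rw [pyGcdB]
    simp [h]

theorem pyGcdB_zero_left (x : Int) : pyGcdB 0 x = x := by
  by_cases hx : x = 0
  · rw [pyGcdB]; simp [hx]
  · have h0 : PySem.Int.mod 0 x = 0 := (PySem.Int.mod_eq_zero_iff_dvd 0 x).mpr (dvd_zero x)
    rw [pyGcdB, pyGcdB]
    simp [hx, h0]

theorem foldB_eq_listGcdA (x : Int) (rest : List Int) :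
    (x :: rest).foldl pyGcdB 0 = listGcdA (x :: rest) := by
  have hfun : pyGcdB = pyGcdA := by
    funext a b; exact (pyGcdA_eq_pyGcdB a b).symm
  have h1 : (x :: rest).foldl pyGcdB 0 = rest.foldl pyGcdB x := by
    simp [List.foldl, pyGcdB_zero_left]
  rw [h1, hfun]
  rfl

theorem loopA_skip (g lo ans : Int) (xs : List Int) (b0 : Int) (hb : b0 ∈ xs) (hd : g ∣ b0) :
    ∀ i, loopA g xs i lo ans = ans := by
  intro i
  fun_induction loopA g xs i lo ans with
  | case1 i h => rfl
  | case2 i h hmod hany ih => exact ih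
  | case3 i h hmod hany =>
    exfalso
    have hig : i ∣ g := (PySem.Int.mod_eq_zero_iff_dvd g i).mp hmod
    have hib : i ∣ b0 := hig.trans hd
    have hm : PySem.Int.mod b0 i = 0 := (PySem.Int.mod_eq_zero_iff_dvd b0 i).mpr hib
    have : xs.any (fun x => PySem.Int.mod x i == 0) = true := by
      simp only [List.any_eq_true]
      exact ⟨b0, hb, by simp [hm]⟩
    simp [this] at hany
  | case4 i h hmod ih => exact ih

theorem loopA_top (g lo ans : Int) (xs : List Int) (hxs : xs ≠ []) (hlo : 0 ≤ lo) :
    loopA g xs g lo ans =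
      if lo < g ∧ 2 ≤ g ∧ (∀ b ∈ xs, ¬ (g ∣ b)) then g else ans := by
  by_cases hgl : g ≤ lo
  · rw [loopA, if_pos hgl, if_neg (by omega : ¬ (lo < g ∧ 2 ≤ g ∧ (∀ b ∈ xs, ¬ (g ∣ b))))]
  · have hmodg : PySem.Int.mod g g = 0 := (PySem.Int.mod_eq_zero_iff_dvd g g).mpr dvd_rfl
    rw [loopA, if_neg hgl, if_pos hmodg]
    by_cases hany : xs.any (fun x => PySem.Int.mod x g == 0) = true
    · -- some element of xs is divisible by g: the whole scan falls through
      rcases List.any_eq_true.mp hany with ⟨b0, hb0, hmod⟩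
      have hd : g ∣ b0 := (PySem.Int.mod_eq_zero_iff_dvd b0 g).mp (by simpa using hmod)
      rw [if_pos hany, loopA_skip g lo ans xs b0 hb0 hd (g - 1),
        if_neg (fun h => h.2.2 b0 hb0 hd)]
    · -- no element divisible by g: the loop returns g itself; this also forces 2 ≤ g
      have hall : ∀ b ∈ xs, ¬ (g ∣ b) := by
        intro b hbmem hdvd
        apply hany
        simp only [List.any_eq_true]
        exact ⟨b, hbmem, by simp [(PySem.Int.mod_eq_zero_iff_dvd b g).mpr hdvd]⟩
      have hg2 : 2 ≤ g := by
        by_contra hlt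
        have hg1 : g = 1 := by omega
        rcases List.exists_mem_of_ne_nil xs hxs with ⟨b, hbmem⟩
        exact hall b hbmem (hg1 ▸ one_dvd b)
      rw [if_neg hany, if_pos ⟨lt_of_not_ge hgl, hg2, hall⟩]

theorem allCond (xs : List Int) (g : Int) :
    ((xs.all fun b => PySem.Int.mod b g != 0) = true) ↔ (∀ b ∈ xs, ¬ (g ∣ b)) := by
  simp [List.all_eq_true, PySem.Int.mod_eq_zero_iff_dvd]

-- ===== VERDICT (by name: the statement is the Claim_ definition above) =====
theorem solution_spec : Claim_equal_solution := by
  intro arrayA arrayB _ hpre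
  obtain ⟨hA, hB⟩ := hpre
  unfold Spec_solution
  cases arrayA with
  | nil => exact absurd rfl hA
  | cons a0 restA =>
  cases arrayB with
  | nil => exact absurd rfl hB
  | cons b0 restB =>
  simp only [solution, solution_alt, foldB_eq_listGcdA]
  set GA := listGcdA (a0 :: restA) with hGA
  set GB := listGcdA (b0 :: restB) with hGB
  rw [loopA_top GA 1 0 (b0 :: restB) (by simp) (by omega)]
  by_cases h1 : 1 < GA ∧ 2 ≤ GA ∧ (∀ b ∈ (b0 :: restB), ¬ (GA ∣ b))
  · have hb1 : 2 ≤ GA ∧ ((b0 :: restB).all fun b => PySem.Int.mod b GA != 0) = true :=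
      ⟨h1.2.1, (allCond _ _).mpr h1.2.2⟩
    rw [if_pos h1, if_pos hb1,
      loopA_top GB GA GA (a0 :: restA) (by simp) (by omega)]
    by_cases h2 : GA < GB ∧ 2 ≤ GB ∧ (∀ a ∈ (a0 :: restA), ¬ (GB ∣ a))
    · rw [if_pos h2, if_pos ⟨h2.1, h2.2.1, (allCond _ _).mpr h2.2.2⟩]
    · rw [if_neg h2, if_neg (fun h => h2 ⟨h.1, h.2.1, (allCond _ _).mp h.2.2⟩)]
  · have hb1 : ¬ (2 ≤ GA ∧ ((b0 :: restB).all fun b => PySem.Int.mod b GA != 0) = true) :=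
      fun h => h1 ⟨by omega, h.1, (allCond _ _).mp h.2⟩
    rw [if_neg h1, if_neg hb1,
      loopA_top GB 0 0 (a0 :: restA) (by simp) (by omega)]
    by_cases h2 : (0:Int) < GB ∧ 2 ≤ GB ∧ (∀ a ∈ (a0 :: restA), ¬ (GB ∣ a))
    · rw [if_pos h2, if_pos ⟨h2.1, h2.2.1, (allCond _ _).mpr h2.2.2⟩]
    · rw [if_neg h2, if_neg (fun h => h2 ⟨h.1, h.2.1, (allCond _ _).mp h.2.2⟩)]
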